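-- pv_equiv track=rewrite | github.com/msheby/cacm-upstart-puzzles | 2020-05/optimal_chimes.py | get_duration
-- ===== SOURCE A (Python) =====
-- def get_duration(chiming_sequence):
--     """Given a chiming sequence, return its duration in seconds."""
--     duration = 0
--     saw_nonzero = False
--     for digit in chiming_sequence:
--         if digit:
--             duration += 1
--             saw_nonzero = True
--         else:
--             if saw_nonzero:
--                 duration += 1
--             saw_nonzero = False
--     return duration
-- ===== SOURCE B (Python) =====
-- def get_duration(chiming_sequence):
--     """Given a chiming sequence, return its duration in seconds."""
--     seq = list(chiming_sequence)
--     nonzeros = sum(1 for d in seq if d)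
--     transitions = sum(1 for prev, cur in zip(seq, seq[1:]) if prev and not cur)
--     return nonzeros + transitions
-- ===== Notes on version B (the rewrite author's own statement) =====
-- stated objective: simpler
-- what changed: Replaced the stateful saw_nonzero flag loop by two stateless counts: the number of nonzero elements plus the number of nonzero-then-zero adjacent boundaries.
import Mathlib
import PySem

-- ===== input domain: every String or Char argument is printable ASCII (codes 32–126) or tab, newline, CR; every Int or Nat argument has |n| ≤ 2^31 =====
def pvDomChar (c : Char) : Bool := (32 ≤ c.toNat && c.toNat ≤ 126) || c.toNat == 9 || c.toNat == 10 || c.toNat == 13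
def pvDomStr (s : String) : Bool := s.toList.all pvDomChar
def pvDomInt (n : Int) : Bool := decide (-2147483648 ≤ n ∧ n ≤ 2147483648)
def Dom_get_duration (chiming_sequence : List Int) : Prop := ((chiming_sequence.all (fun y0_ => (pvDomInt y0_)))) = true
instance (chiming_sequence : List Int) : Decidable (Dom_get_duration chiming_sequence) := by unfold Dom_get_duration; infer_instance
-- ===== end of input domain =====

-- B replaces A's stateful flag-loop by two stateless counts (nonzeros + nonzero→zero boundaries); objective: simpler.


-- ===== PORT A =====
-- step of A's loop over state (duration, saw_nonzero), branches in source order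
def getDurationStep (st : Int × Bool) (digit : Int) : Int × Bool :=
  if digit ≠ 0 then (st.1 + 1, true)
  else (if st.2 then st.1 + 1 else st.1, false)

def get_duration (chiming_sequence : List Int) : Int :=
  (chiming_sequence.foldl getDurationStep (0, false)).1

-- ===== PORT B =====
def get_duration_alt (chiming_sequence : List Int) : Int :=
  let seq := chiming_sequence
  let nonzeros : Int := (seq.filter (fun d => d ≠ 0)).length
  let transitions : Int := ((seq.zip seq.tail).filter (fun p => p.1 ≠ 0 ∧ p.2 = 0)).length
  nonzeros + transitions

-- ===== PRECONDITION & SPEC =====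
def Spec_get_duration (chiming_sequence : List Int) (out : Int) : Prop := out = get_duration_alt chiming_sequence
instance (chiming_sequence : List Int) (out : Int) : Decidable (Spec_get_duration chiming_sequence out) := by unfold Spec_get_duration; infer_instance

-- ===== CLAIM (what is proved, stated in full; the proofs are below) =====
def Claim_equal_get_duration : Prop := ∀ (chiming_sequence : List Int), Dom_get_duration chiming_sequence → Spec_get_duration chiming_sequence (get_duration chiming_sequence)

-- ===== LEMMAS AND PROOFS =====

-- number of nonzero→zero boundaries seen by A's loop when the flag enters as `saw`
def pvTrans (saw : Bool) : List Int → Int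
  | [] => 0
  | x :: xs => (if saw ∧ x = 0 then 1 else 0) + pvTrans (decide (x ≠ 0)) xs

theorem pvFold_eq (l : List Int) : ∀ (d : Int) (saw : Bool),
    (l.foldl getDurationStep (d, saw)).1
      = d + ((l.filter (fun x => x ≠ 0)).length : Int) + pvTrans saw l := by
  induction l with
  | nil => intro d saw; simp [pvTrans]
  | cons x xs ih =>
    intro d saw
    by_cases hx : x = 0
    · subst hx
      cases saw <;> simp [getDurationStep, pvTrans, ih] <;> ring
    · simp [getDurationStep, pvTrans, hx, ih]
      ring

theorem pvTrans_eq_zipcount (xs : List Int) : ∀ (x : Int),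
    pvTrans (decide (x ≠ 0)) xs
      = ((((x :: xs).zip xs).filter (fun p => p.1 ≠ 0 ∧ p.2 = 0)).length : Int) := by
  induction xs with
  | nil => intro x; simp [pvTrans]
  | cons y ys ih =>
    intro x
    have h := ih y
    simp only [pvTrans]
    rw [h]
    by_cases hx : x = 0 <;> by_cases hy : y = 0 <;> simp [hx, hy] <;> omega

-- ===== VERDICT (by name: the statement is the Claim_ definition above) =====
theorem get_duration_spec : Claim_equal_get_duration := by
  intro l _
  show get_duration l = get_duration_alt l
  cases l with
  | nil => decide
  | cons x xs =>
    simp only [get_duration, get_duration_alt, pvFold_eq, List.tail_cons]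
    have := pvTrans_eq_zipcount xs x
    simp [pvTrans] at this ⊢
    omega
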